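-- pv_equiv track=rewrite | github.com/learntocloud/learn-to-cloud-app | api/services/security_verification_service.py | _find_codeql_workflow_candidates
-- ===== SOURCE A (Python) =====
-- def _find_codeql_workflow_candidates(file_paths: list[str]) -> list[str]:
--     """Find workflow files that may contain CodeQL configuration.
--
--     Returns workflow paths that either:
--     - Have 'codeql' in the filename
--     - Are any .yml/.yaml file in .github/workflows/ (to check content)
--     """
--     codeql_by_name: list[str] = []
--     other_workflows: list[str] = []
--
--     for path in file_paths:
--         if not path.startswith(".github/workflows/"):
--             continue
--         if not (path.endswith(".yml") or path.endswith(".yaml")):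
--             continue
--
--         filename = path.rsplit("/", 1)[-1].lower()
--         if "codeql" in filename:
--             codeql_by_name.append(path)
--         else:
--             other_workflows.append(path)
--
--     # Prioritise files with codeql in name, then check others
--     return codeql_by_name + other_workflows
-- ===== SOURCE B (Python) =====
-- def _find_codeql_workflow_candidates(file_paths: list[str]) -> list[str]:
--     """Filter valid workflow paths in one pass, then stable-sort with a boolean
--     key so codeql-named files come first (filter + stable sort instead of
--     two-accumulator partition)."""
--     filtered = [
--         p for p in file_paths
--         if p.startswith(".github/workflows/")
--         and (p.endswith(".yml") or p.endswith(".yaml"))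
--     ]
--     return sorted(filtered, key=lambda p: "codeql" not in p.rsplit("/", 1)[-1].lower())
-- ===== Notes on version B (the rewrite author's own statement) =====
-- stated objective: alternative
-- what changed: Replaced A's two-accumulator partition loop by a one-pass filter of valid workflow paths followed by a stable sort on the boolean key 'codeql not in basename', whose stability reproduces the partition-then-concatenate order.
import Mathlib
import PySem

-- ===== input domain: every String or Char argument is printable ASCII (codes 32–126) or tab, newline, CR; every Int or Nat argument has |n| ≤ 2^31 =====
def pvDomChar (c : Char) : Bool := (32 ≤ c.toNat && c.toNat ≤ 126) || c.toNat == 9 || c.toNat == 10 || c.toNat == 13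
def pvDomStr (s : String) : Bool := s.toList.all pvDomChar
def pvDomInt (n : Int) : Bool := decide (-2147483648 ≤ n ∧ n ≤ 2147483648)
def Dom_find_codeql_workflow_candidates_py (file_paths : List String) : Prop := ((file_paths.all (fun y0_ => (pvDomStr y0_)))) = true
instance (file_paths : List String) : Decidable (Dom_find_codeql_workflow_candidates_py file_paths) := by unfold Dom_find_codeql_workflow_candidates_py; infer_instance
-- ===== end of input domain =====

-- B replaces A's two-accumulator partition by filter + stable sort on a boolean key; alternative decomposition, same result.

-- hand port of s.rsplit("/", 1)[-1] (the part after the LAST "/"; the whole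
-- string if there is none) — exact: rfind gives the index of the last "/"
def pvRsplitSlashLast (s : String) : String :=
  let i := PySem.Str.rfind s "/"
  if i = -1 then s else PySem.Str.slice s (some (i + 1)) none

-- ===== PORT A =====
def find_codeql_workflow_candidates_py (file_paths : List String) : List String :=
  let r := file_paths.foldl
    (fun (acc : List String × List String) path =>
      if !(PySem.Str.startswith path ".github/workflows/") then acc
      else if !(PySem.Str.endswith path ".yml" || PySem.Str.endswith path ".yaml") then acc
      else
        let filename := PySem.Str.lower (pvRsplitSlashLast path)
        if PySem.Str.isIn "codeql" filename then (acc.1 ++ [path], acc.2)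
        else (acc.1, acc.2 ++ [path]))
    ([], [])
  r.1 ++ r.2

-- ===== PORT B =====
def pvIsWorkflow (p : String) : Bool :=
  PySem.Str.startswith p ".github/workflows/" &&
    (PySem.Str.endswith p ".yml" || PySem.Str.endswith p ".yaml")

def pvKey (p : String) : Bool :=
  !(PySem.Str.isIn "codeql" (PySem.Str.lower (pvRsplitSlashLast p)))

def find_codeql_workflow_candidates_py_alt (file_paths : List String) : List String :=
  PySem.List.sorted (file_paths.filter pvIsWorkflow) pvKey false

-- ===== PRECONDITION & SPEC =====
def Spec_find_codeql_workflow_candidates_py (file_paths : List String) (out : List String) : Prop := out = find_codeql_workflow_candidates_py_alt file_paths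
instance (file_paths : List String) (out : List String) : Decidable (Spec_find_codeql_workflow_candidates_py file_paths out) := by unfold Spec_find_codeql_workflow_candidates_py; infer_instance

-- ===== CLAIM (what is proved, stated in full; the proofs are below) =====
def Claim_equal_find_codeql_workflow_candidates_py : Prop := ∀ (file_paths : List String), Dom_find_codeql_workflow_candidates_py file_paths → Spec_find_codeql_workflow_candidates_py file_paths (find_codeql_workflow_candidates_py file_paths)

-- ===== LEMMAS AND PROOFS =====

-- insertBy with a boolean key: an element whose key is true goes to the end,
-- an element whose key is false goes between the false-block and the true-block.
theorem pv_insertBy_true {α : Type} (key : α → Bool) (x : α) (hx : key x = true)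
    (l : List α) :
    PySem.List.insertBy (fun a b => decide (key a < key b)) x l = l ++ [x] := by
  induction l with
  | nil => simp [PySem.List.insertBy]
  | cons y ys ih =>
      simp [PySem.List.insertBy, hx, ih]

theorem pv_insertBy_false {α : Type} (key : α → Bool) (x : α) (hx : key x = false)
    (F T : List α) (hF : ∀ f ∈ F, key f = false) (hT : ∀ t ∈ T, key t = true) :
    PySem.List.insertBy (fun a b => decide (key a < key b)) x (F ++ T)
      = (F ++ [x]) ++ T := by
  induction F with
  | nil =>
      cases T with
      | nil => simp [PySem.List.insertBy]
      | cons t ts =>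
          have ht : key t = true := hT t (by simp)
          simp [PySem.List.insertBy, hx, ht]
  | cons f fs ih =>
      have hf : key f = false := hF f (by simp)
      have := ih (fun g hg => hF g (by simp [hg]))
      simp [PySem.List.insertBy, hx, hf, this]

-- the stable insertion-sort fold with a boolean key keeps a "false-block ++ true-block" shape
theorem pv_fold_shape {α : Type} (key : α → Bool) (xs : List α) :
    ∀ (F T : List α), (∀ f ∈ F, key f = false) → (∀ t ∈ T, key t = true) →
      xs.foldl (fun acc x => PySem.List.insertBy (fun a b => decide (key a < key b)) x acc) (F ++ T)
        = (F ++ xs.filter (fun x => !key x)) ++ (T ++ xs.filter key) := by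
  induction xs with
  | nil => intro F T _ _; simp
  | cons x xs ih =>
      intro F T hF hT
      by_cases hx : key x = true
      · have h1 : PySem.List.insertBy (fun a b => decide (key a < key b)) x (F ++ T)
            = F ++ (T ++ [x]) := by
          rw [← List.append_assoc]; exact pv_insertBy_true key x hx (F ++ T)
        have h2 := ih F (T ++ [x]) hF (by
          intro t ht
          rcases List.mem_append.mp ht with h | h
          · exact hT t h
          · simp at h; simpa [h] using hx)
        simp only [List.foldl_cons, h1, h2, List.filter_cons, hx]
        simp
      · have hx' : key x = false := by simpa using hx
        have h1 := pv_insertBy_false key x hx' F T hF hT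
        have h2 := ih (F ++ [x]) T (by
          intro f hf
          rcases List.mem_append.mp hf with h | h
          · exact hF f h
          · simp at h; simpa [h] using hx') hT
        simp only [List.foldl_cons, h1, h2, List.filter_cons, hx']
        simp

-- A's two-accumulator loop is "partition the valid workflow paths"
theorem pv_a_fold (xs : List String) :
    ∀ (c o : List String),
      xs.foldl
        (fun (acc : List String × List String) path =>
          if !(PySem.Str.startswith path ".github/workflows/") then acc
          else if !(PySem.Str.endswith path ".yml" || PySem.Str.endswith path ".yaml") then acc
          else
            let filename := PySem.Str.lower (pvRsplitSlashLast path)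
            if PySem.Str.isIn "codeql" filename then (acc.1 ++ [path], acc.2)
            else (acc.1, acc.2 ++ [path])) (c, o)
      = (c ++ (xs.filter pvIsWorkflow).filter (fun p => !pvKey p),
         o ++ (xs.filter pvIsWorkflow).filter pvKey) := by
  induction xs with
  | nil => intro c o; simp
  | cons x xs ih =>
      intro c o
      by_cases h1 : PySem.Str.startswith x ".github/workflows/" = true
      · by_cases h2 : (PySem.Str.endswith x ".yml" || PySem.Str.endswith x ".yaml") = true
        · have hw : pvIsWorkflow x = true := by unfold pvIsWorkflow; rw [h1, h2]; rfl
          by_cases h3 : PySem.Str.isIn "codeql" (PySem.Str.lower (pvRsplitSlashLast x)) = true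
          · have hk : pvKey x = false := by unfold pvKey; rw [h3]; rfl
            simp only [List.foldl_cons, List.filter_cons, h1, h2, h3, hw, hk,
              Bool.not_true, reduceIte]
            rw [ih]
            simp
          · simp only [Bool.not_eq_true] at h3
            have hk : pvKey x = true := by unfold pvKey; rw [h3]; rfl
            simp only [List.foldl_cons, List.filter_cons, h1, h2, h3, hw, hk,
              Bool.not_true, Bool.not_false, reduceIte]
            rw [ih]
            simp
        · simp only [Bool.not_eq_true] at h2
          have hw : pvIsWorkflow x = false := by unfold pvIsWorkflow; rw [h1, h2]; rfl
          simp only [List.foldl_cons, List.filter_cons, h1, h2, hw,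
            Bool.not_true, Bool.not_false, reduceIte]
          exact ih c o
      · simp only [Bool.not_eq_true] at h1
        have hw : pvIsWorkflow x = false := by unfold pvIsWorkflow; rw [h1]; rfl
        simp only [List.foldl_cons, List.filter_cons, h1, hw, Bool.not_false, reduceIte]
        exact ih c o

-- ===== VERDICT (by name: the statement is the Claim_ definition above) =====
theorem find_codeql_workflow_candidates_py_spec : Claim_equal_find_codeql_workflow_candidates_py := by
  intro file_paths _
  show _ = _
  have hsort : find_codeql_workflow_candidates_py_alt file_paths
      = (file_paths.filter pvIsWorkflow).filter (fun p => !pvKey p)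
        ++ (file_paths.filter pvIsWorkflow).filter pvKey := by
    unfold find_codeql_workflow_candidates_py_alt
    rw [PySem.List.sorted_eq_foldl_insertBy]
    have h := pv_fold_shape pvKey (file_paths.filter pvIsWorkflow) [] []
      (by simp) (by simp)
    simpa using h
  unfold find_codeql_workflow_candidates_py
  rw [pv_a_fold file_paths [] [], hsort]
  simp
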